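-- pv_equiv track=rewrite | github.com/sharanramjee/My-LeetCode-Solutions | BinarySearch.py | search
-- ===== SOURCE A (Python) =====
-- def search(nums, target):
--     """
--     :type nums: List[int]
--     :type target: int
--     :rtype: int
--     """
--     if nums is None or target is None:
--         return -1
--     nums.sort()
--     left = 0
--     right = len(nums) - 1
--     while(right >= left):
--         mid = (right + left) // 2
--         if target == nums[mid]:
--             return mid
--         elif target > nums[mid]:
--             left = mid + 1
--         elif target < nums[mid]:
--             right = mid - 1
--     return -1
-- ===== SOURCE B (Python) =====
-- def search(nums, target):
--     # Index of target in the sorted order = number of elements smaller than it.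
--     if nums is None or target is None:
--         return -1
--     if target not in nums:
--         return -1
--     return sum(1 for x in nums if x < target)
-- ===== Notes on version B (the rewrite author's own statement) =====
-- stated objective: simpler
-- what changed: B replaces sort-then-binary-search by a membership test plus a count of elements smaller than target (the target's index in sorted order); Pre_ excludes inputs where target occurs more than once, on which the particular duplicate index A's midpoint sequence lands on is accidental; A also sorts nums in place while B does not (the claim is about the return value only).
-- outside the precondition, e.g. on search([1, 1, 1], 1): A returns 1, B returns 0
import Mathlib
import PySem

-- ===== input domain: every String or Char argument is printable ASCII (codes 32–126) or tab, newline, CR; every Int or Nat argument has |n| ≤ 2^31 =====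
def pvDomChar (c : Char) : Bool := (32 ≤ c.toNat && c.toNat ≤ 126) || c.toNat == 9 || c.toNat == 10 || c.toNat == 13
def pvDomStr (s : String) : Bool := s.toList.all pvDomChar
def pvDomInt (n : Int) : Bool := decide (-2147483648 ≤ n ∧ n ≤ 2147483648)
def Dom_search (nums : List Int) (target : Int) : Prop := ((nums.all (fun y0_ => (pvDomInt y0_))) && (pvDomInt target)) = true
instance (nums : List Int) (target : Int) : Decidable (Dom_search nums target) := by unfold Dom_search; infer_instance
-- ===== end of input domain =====

-- B replaces sort-then-binary-search by a membership test plus a count of the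
-- elements smaller than target; A sorts nums in place while B does not (the
-- claim is about the return value only).

-- ===== PORT A =====
-- while(right >= left): mid = (right+left)//2; compare target with nums[mid].
-- nums[mid] is always in range here (0 ≤ left ≤ mid ≤ right < len whenever the
-- loop is entered from `search`), so the `none` (IndexError) arm is unreachable.
def searchLoopA (s : List Int) (target left right : Int) : Int :=
  if _h : right ≥ left then
    let mid := PySem.Int.floordiv (right + left) 2
    match PySem.List.pyGet? s mid with
    | none => -1
    | some v =>
      if target = v then mid
      else if target > v then searchLoopA s target (mid + 1) right
      else searchLoopA s target left (mid - 1)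
  else -1
termination_by (right + 1 - left).toNat
decreasing_by
  all_goals
    have hb := PySem.Int.floordiv_two_mid_bounds _h
    rw [Int.add_comm left right] at hb
    omega

def search (nums : List Int) (target : Int) : Int :=
  let s := PySem.List.sorted nums (fun x => x) false
  searchLoopA s target 0 ((s.length : Int) - 1)

-- ===== PORT B =====
def search_alt (nums : List Int) (target : Int) : Int :=
  if ¬ target ∈ nums then -1
  else (nums.countP (fun x => decide (x < target)) : Int)

-- ===== PRECONDITION & SPEC =====
-- Pre_ excludes inputs where target occurs more than once: which duplicate's
-- index A's binary search returns is a first-vs-last tie nobody would specify.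
def Pre_search (nums : List Int) (target : Int) : Prop := nums.count target ≤ 1
instance (nums : List Int) (target : Int) : Decidable (Pre_search nums target) := by unfold Pre_search; infer_instance
def pvWitness_search : List Int × Int := ([5, 1, 3], 3)

def Spec_search (nums : List Int) (target : Int) (out : Int) : Prop := out = search_alt nums target
instance (nums : List Int) (target : Int) (out : Int) : Decidable (Spec_search nums target out) := by unfold Spec_search; infer_instance

-- ===== CLAIM (what is proved, stated in full; the proofs are below) =====
def Claim_equal_search : Prop := ∀ (nums : List Int) (target : Int), Dom_search nums target → Pre_search nums target → Spec_search nums target (search nums target)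

-- ===== LEMMAS AND PROOFS =====

theorem countP_le_split (s : List Int) (t : Int) :
    s.countP (fun x => decide (x ≤ t)) =
      s.countP (fun x => decide (x < t)) + s.countP (fun x => decide (x = t)) := by
  induction s with
  | nil => simp
  | cons x tl ih =>
    simp only [List.countP_cons, ih, decide_eq_true_eq]
    split_ifs <;> omega

-- in a ≤-sorted list, a downward-closed predicate holds at index i iff i < its count
theorem sorted_countP_iff (p : Int → Bool)
    (hmono : ∀ x y : Int, x ≤ y → p y = true → p x = true) :
    ∀ (s : List Int), s.Pairwise (· ≤ ·) →
      ∀ (i : Nat) (hi : i < s.length), (p s[i] = true ↔ i < s.countP p) := by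
  intro s
  induction s with
  | nil => intro _ i hi; simp at hi
  | cons x tl ih =>
    intro hp i hi
    rcases List.pairwise_cons.mp hp with ⟨hx, htl⟩
    by_cases hpx : p x = true
    · cases i with
      | zero => simp [hpx]
      | succ j =>
        have hj : j < tl.length := by simpa using hi
        have := ih htl j hj
        simp only [List.getElem_cons_succ, List.countP_cons, hpx, if_pos]
        constructor
        · intro h; have := this.mp h; omega
        · intro h; exact this.mpr (by omega)
    · have h0 : tl.countP p = 0 := by
        refine List.countP_eq_zero.mpr (fun y hy hpy => hpx (hmono x y (hx y hy) hpy))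
      cases i with
      | zero => simp [hpx, h0]
      | succ j =>
        have hj : j < tl.length := by simpa using hi
        have hmem : tl[j] ∈ tl := List.getElem_mem hj
        have hnp : ¬ p tl[j] = true := fun hpy => hpx (hmono x _ (hx _ hmem) hpy)
        simp [hpx, h0, hnp]

-- the binary-search loop over a sorted list s: if target is absent it returns -1;
-- if it occurs exactly once at sorted index `less` ∈ [l, r] it returns `less`.
theorem loopA_correct (s : List Int) (t : Int) (hp : s.Pairwise (· ≤ ·)) :
    ∀ (n : Nat) (l r : Int), (r + 1 - l).toNat ≤ n → 0 ≤ l → r < (s.length : Int) →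
      (s.countP (fun x => decide (x = t)) = 0 → searchLoopA s t l r = -1) ∧
      (s.countP (fun x => decide (x = t)) = 1 →
        l ≤ (s.countP (fun x => decide (x < t)) : Int) →
        (s.countP (fun x => decide (x < t)) : Int) ≤ r →
        searchLoopA s t l r = (s.countP (fun x => decide (x < t)) : Int)) := by
  intro n
  induction n with
  | zero =>
    intro l r hn hl hr
    have hno : ¬ r ≥ l := by omega
    rw [searchLoopA, dif_neg hno]
    refine ⟨fun _ => rfl, fun _ h1 h2 => ?_⟩
    omega
  | succ n ih =>
    intro l r hn hl hr
    by_cases hlr : r ≥ l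
    · have hb := PySem.Int.floordiv_two_mid_bounds (hlr : l ≤ r)
      rw [Int.add_comm l r] at hb
      set mid := PySem.Int.floordiv (r + l) 2 with hmid
      have h0m : 0 ≤ mid := by omega
      have hmlen : mid < (s.length : Int) := by omega
      have hget : PySem.List.pyGet? s mid = some s[mid.toNat] :=
        PySem.List.pyGet?_eq_some_getElem _ h0m hmlen
      have hit : mid.toNat < s.length := by omega
      have hlt := sorted_countP_iff (fun x => decide (x < t))
        (fun x y hxy hy => by simp at hy ⊢; omega) s hp mid.toNat hit
      have hle := sorted_countP_iff (fun x => decide (x ≤ t))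
        (fun x y hxy hy => by simp at hy ⊢; omega) s hp mid.toNat hit
      simp only [decide_eq_true_eq] at hlt hle
      rw [countP_le_split] at hle
      rw [searchLoopA]
      rw [dif_pos hlr]
      simp only [← hmid, hget]
      constructor
      · intro heq0
        rcases lt_trichotomy (s[mid.toNat]) t with hv | hv | hv
        · rw [if_neg (by omega : ¬ t = s[mid.toNat]), if_pos (hv : t > s[mid.toNat])]
          exact (ih (mid + 1) r (by omega) (by omega) hr).1 heq0
        · exfalso
          have h2 : s[mid.toNat] ≤ t := by omega
          have := hle.mp h2
          have hnl : ¬ s[mid.toNat] < t := by omega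
          have := fun hc => hnl (hlt.mpr hc)
          omega
        · rw [if_neg (by omega : ¬ t = s[mid.toNat]), if_neg (by omega : ¬ t > s[mid.toNat])]
          exact (ih l (mid - 1) (by omega) hl (by omega)).1 heq0
      · intro heq1 h1 h2
        rcases lt_trichotomy (s[mid.toNat]) t with hv | hv | hv
        · have hc : mid.toNat < s.countP (fun x => decide (x < t)) := hlt.mp hv
          rw [if_neg (by omega : ¬ t = s[mid.toNat]), if_pos (hv : t > s[mid.toNat])]
          exact (ih (mid + 1) r (by omega) (by omega) hr).2 heq1 (by omega) h2
        · rw [if_pos (by omega : t = s[mid.toNat])]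
          -- mid is the unique index of t: less ≤ mid < less + 1
          have hmle : s[mid.toNat] ≤ t := by omega
          have hmnlt : ¬ s[mid.toNat] < t := by omega
          have hcle := hle.mp hmle
          have hcnlt : ¬ mid.toNat < s.countP (fun x => decide (x < t)) :=
            fun hc => hmnlt (hlt.mpr hc)
          omega
        · have hnle : ¬ s[mid.toNat] ≤ t := by omega
          have hc1 : ¬ mid.toNat < s.countP (fun x => decide (x < t)) + s.countP (fun x => decide (x = t)) :=
            fun hc => hnle (hle.mpr hc)
          rw [if_neg (by omega : ¬ t = s[mid.toNat]), if_neg (by omega : ¬ t > s[mid.toNat])]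
          exact (ih l (mid - 1) (by omega) hl (by omega)).2 heq1 h1 (by omega)
    · rw [searchLoopA, dif_neg hlr]
      refine ⟨fun _ => rfl, fun _ h1 h2 => ?_⟩
      omega

-- ===== VERDICT (by name: the statement is the Claim_ definition above) =====
theorem search_spec : Claim_equal_search := by
  intro nums t _ hpre
  unfold Spec_search search search_alt
  have hperm : (PySem.List.sorted nums (fun x => x) false).Perm nums :=
    PySem.List.sorted_perm nums (fun x => x) false
  have hlen : (PySem.List.sorted nums (fun x => x) false).length = nums.length := hperm.length_eq
  have hp : (PySem.List.sorted nums (fun x => x) false).Pairwise (· ≤ ·) := by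
    simpa using PySem.List.sorted_pairwise (xs := nums) (key := fun x => x)
  set s := PySem.List.sorted nums (fun x => x) false with hs
  have hcount : nums.count t = s.countP (fun x => decide (x = t)) := by
    rw [hperm.countP_eq, List.count]
    exact List.countP_congr (fun x _ => by simp)
  have hless : s.countP (fun x => decide (x < t)) = nums.countP (fun x => decide (x < t)) :=
    hperm.countP_eq _
  have hmain := loopA_correct s t hp ((s.length : Int) - 1 + 1 - 0).toNat 0 ((s.length : Int) - 1)
    (by omega) (by omega) (by omega)
  unfold Pre_search at hpre
  by_cases hmem : t ∈ nums
  · have h1 : 1 ≤ nums.count t := List.one_le_count_iff.mpr hmem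
    have heq1 : s.countP (fun x => decide (x = t)) = 1 := by omega
    have hsum : s.countP (fun x => decide (x ≤ t)) ≤ s.length := List.countP_le_length
    rw [countP_le_split] at hsum
    rw [hmain.2 heq1 (by omega) (by omega)]
    simp [hmem, hless]
  · have h0 : nums.count t = 0 := List.count_eq_zero.mpr hmem
    rw [hmain.1 (by omega)]
    simp [hmem]
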